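-- pv_equiv track=rewrite | github.com/TheCommonCold/PIRO1 | KCK.py | arg_min_max
-- ===== SOURCE A (Python) =====
-- def arg_min_max(lista):
--     # zwarca argumenty min i max danej listy
--     max = min = lista[0]
--     argmin = 0
--     argmax = 0
--     for k in range(len(lista)):
--         if lista[k] < min:
--             min = lista[k]
--             argmin = k
--         elif (lista[k] > max):
--             max = lista[k]
--             argmax = k
--     return argmin, argmax
-- ===== SOURCE B (Python) =====
-- def arg_min_max(lista):
--     idx = range(len(lista))
--     return (min(idx, key=lista.__getitem__), max(idx, key=lista.__getitem__))
-- ===== Notes on version B (the rewrite author's own statement) =====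
-- stated objective: idiomatic
-- what changed: Replaces the single hand-written scan that threads four state variables (running min, max and both indices) with two independent keyed reductions min/max over the index range, which pick the first extremal index exactly as A's strict-inequality updates do.
import Mathlib
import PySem

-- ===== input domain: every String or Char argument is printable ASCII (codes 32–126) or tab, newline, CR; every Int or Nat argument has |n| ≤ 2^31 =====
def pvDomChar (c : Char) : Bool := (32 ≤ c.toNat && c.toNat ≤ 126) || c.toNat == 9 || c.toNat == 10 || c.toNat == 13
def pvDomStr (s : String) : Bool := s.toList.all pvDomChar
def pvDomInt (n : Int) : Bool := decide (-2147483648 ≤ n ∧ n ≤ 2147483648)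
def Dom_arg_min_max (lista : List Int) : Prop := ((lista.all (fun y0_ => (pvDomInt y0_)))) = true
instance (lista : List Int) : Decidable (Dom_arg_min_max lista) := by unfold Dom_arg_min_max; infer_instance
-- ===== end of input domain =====

-- B replaces A's single four-variable scan by two independent keyed reductions
-- (first argmin / first argmax over the index range); objective: idiomatic, same cost.

-- ===== PORT A =====
def arg_min_max (lista : List Int) : Int × Int :=
  let m0 := PySem.List.pyGetD lista 0 0
  -- state (max, min, argmin, argmax), as in A
  let r := (PySem.List.pyRange 0 (lista.length : Int) 1).foldl
      (fun (st : Int × Int × Int × Int) k =>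
        let x := PySem.List.pyGetD lista k 0
        if x < st.2.1 then (st.1, x, k, st.2.2.2)
        else if x > st.1 then (x, st.2.1, st.2.2.1, k)
        else st)
      (m0, m0, 0, 0)
  (r.2.2.1, r.2.2.2)

-- ===== PORT B =====
def arg_min_max_alt (lista : List Int) : Int × Int :=
  let idx := PySem.List.pyRange 0 (lista.length : Int) 1
  let key := fun i => PySem.List.pyGetD lista i 0
  ((PySem.List.min? idx key).getD 0, (PySem.List.max? idx key).getD 0)

-- ===== PRECONDITION & SPEC =====
-- A subscripts the first element, so on the empty list it raises IndexError (B's min/max raise ValueError there).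
def Pre_arg_min_max (lista : List Int) : Prop := lista ≠ []
instance (lista : List Int) : Decidable (Pre_arg_min_max lista) := by unfold Pre_arg_min_max; infer_instance
def pvWitness_arg_min_max : List Int := ([1, 3, 2])

def Spec_arg_min_max (lista : List Int) (out : Int × Int) : Prop := out = arg_min_max_alt lista
instance (lista : List Int) (out : Int × Int) : Decidable (Spec_arg_min_max lista out) := by unfold Spec_arg_min_max; infer_instance

-- ===== CLAIM (what is proved, stated in full; the proofs are below) =====
def Claim_equal_arg_min_max : Prop := ∀ (lista : List Int), Dom_arg_min_max lista → Pre_arg_min_max lista → Spec_arg_min_max lista (arg_min_max lista)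

-- ===== LEMMAS AND PROOFS =====

-- A's combined loop step and the two reduction steps of min?/max?, over a common index list.
def pvStepA (lista : List Int) (st : Int × Int × Int × Int) (k : Int) : Int × Int × Int × Int :=
  let x := PySem.List.pyGetD lista k 0
  if x < st.2.1 then (st.1, x, k, st.2.2.2)
  else if x > st.1 then (x, st.2.1, st.2.2.1, k)
  else st

def pvKey (lista : List Int) (i : Int) : Int := PySem.List.pyGetD lista i 0

def pvMinStep (lista : List Int) (acc : Option Int) (x : Int) : Option Int :=
  match acc with
  | none => some x
  | some m => if pvKey lista x < pvKey lista m then some x else some m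

def pvMaxStep (lista : List Int) (acc : Option Int) (x : Int) : Option Int :=
  match acc with
  | none => some x
  | some m => if pvKey lista m < pvKey lista x then some x else some m

lemma pv_loop_eq (lista : List Int) :
    ∀ (idxs : List Int) (am aM : Int), pvKey lista am ≤ pvKey lista aM →
      ∃ a b, idxs.foldl (pvMinStep lista) (some am) = some a ∧
        idxs.foldl (pvMaxStep lista) (some aM) = some b ∧
        idxs.foldl (pvStepA lista) (pvKey lista aM, pvKey lista am, am, aM) =
          (pvKey lista b, pvKey lista a, a, b) := by
  intro idxs
  induction idxs with
  | nil => intro am aM h; exact ⟨am, aM, rfl, rfl, rfl⟩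
  | cons i t ih =>
    intro am aM h
    simp only [List.foldl_cons]
    by_cases h1 : PySem.List.pyGetD lista i 0 < PySem.List.pyGetD lista am 0
    · have h2 : ¬ PySem.List.pyGetD lista aM 0 < PySem.List.pyGetD lista i 0 := by
        have := h; simp only [pvKey] at this; omega
      obtain ⟨a, b, ha, hb, hA⟩ := ih i aM (by simp only [pvKey] at *; omega)
      refine ⟨a, b, ?_, ?_, ?_⟩
      · simpa [pvMinStep, pvKey, h1] using ha
      · simpa [pvMaxStep, pvKey, h2] using hb
      · simpa [pvStepA, pvKey, h1, h2] using hA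
    · by_cases h2 : PySem.List.pyGetD lista aM 0 < PySem.List.pyGetD lista i 0
      · obtain ⟨a, b, ha, hb, hA⟩ := ih am i (by simp only [pvKey] at *; omega)
        refine ⟨a, b, ?_, ?_, ?_⟩
        · simpa [pvMinStep, pvKey, h1] using ha
        · simpa [pvMaxStep, pvKey, h2] using hb
        · simpa [pvStepA, pvKey, h1, h2] using hA
      · obtain ⟨a, b, ha, hb, hA⟩ := ih am aM h
        refine ⟨a, b, ?_, ?_, ?_⟩
        · simpa [pvMinStep, pvKey, h1] using ha
        · simpa [pvMaxStep, pvKey, h2] using hb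
        · simpa [pvStepA, pvKey, h1, h2] using hA

-- ===== VERDICT (by name: the statement is the Claim_ definition above) =====
theorem arg_min_max_spec : Claim_equal_arg_min_max := by
  intro lista _ hpre
  unfold Spec_arg_min_max arg_min_max arg_min_max_alt
  obtain ⟨y, t, rfl⟩ := List.exists_cons_of_ne_nil hpre
  have hlen : (0 : Int) < ((y :: t).length : Int) := by simp
  rw [PySem.List.pyRange_one_cons hlen]
  have h0 : PySem.List.pyGetD (y :: t) (0:Int) 0 = y := PySem.List.pyGetD_zero_cons y t 0
  have hfirst :
      (fun (st : Int × Int × Int × Int) k =>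
        let x := PySem.List.pyGetD (y :: t) k 0
        if x < st.2.1 then (st.1, x, k, st.2.2.2)
        else if x > st.1 then (x, st.2.1, st.2.2.1, k)
        else st) = pvStepA (y :: t) := by
    funext st k; simp [pvStepA]
  simp only [List.foldl_cons, hfirst, h0, zero_add]
  have hstep0 : pvStepA (y :: t) (y, y, 0, 0) 0 = (y, y, 0, 0) := by
    simp [pvStepA, h0]
  rw [hstep0]
  obtain ⟨a, b, ha, hb, hA⟩ :=
    pv_loop_eq (y :: t) (PySem.List.pyRange 1 ((y :: t).length : Int) 1) 0 0 (le_refl _)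
  have hy : pvKey (y :: t) 0 = y := h0
  rw [hy] at hA
  rw [hA]
  have hmin : PySem.List.min? ((0:Int) :: PySem.List.pyRange 1 ((y :: t).length : Int) 1)
      (fun i => PySem.List.pyGetD (y :: t) i 0) = some a := by
    rw [PySem.List.min?.eq_1,
      List.foldl_ext _ (pvMinStep (y :: t)) none (fun acc x _ => by cases acc <;> simp [pvMinStep, pvKey]),
      List.foldl_cons]
    simpa [pvMinStep] using ha
  have hmax : PySem.List.max? ((0:Int) :: PySem.List.pyRange 1 ((y :: t).length : Int) 1)
      (fun i => PySem.List.pyGetD (y :: t) i 0) = some b := by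
    rw [PySem.List.max?.eq_1,
      List.foldl_ext _ (pvMaxStep (y :: t)) none (fun acc x _ => by cases acc <;> simp [pvMaxStep, pvKey]),
      List.foldl_cons]
    simpa [pvMaxStep] using hb
  rw [hmin, hmax]
  rfl
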